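-- pv_equiv track=rewrite | github.com/alexandraback/datacollection | solutions_5751500831719424_1/Python/Renelvon/a.py | solve
-- ===== SOURCE A (Python) =====
-- def uniques(s):
--     cur_char = None
--     groups = []
--     cur_group = []
--     for char in s:
--         if cur_char is None or char != cur_char:
--             if cur_char is not None:
--                 groups.append(cur_char)
--             cur_char = char
--     groups.append(cur_char)
--     return groups
--
-- def rle(s):
--     cur_char = None
--     groups = []
--     counter = 0
--     for char in s:
--         if cur_char is None or char != cur_char:
--             if cur_char is not None:
--                 groups.append(counter)
--             cur_char = char
--             counter = 1
--         else:
--             counter += 1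
--     groups.append(counter)
--     return groups
--
-- def solve(N, strings):
--     unique_seq = uniques(strings[0])
--     for string in strings[1:]:
--         if uniques(string) != unique_seq:
--             return -1
--
--     rlest = list(zip(*[rle(s) for s in strings]))
--
--     moves = 0
--     for group in rlest:
--         moves += min(sum([abs(level - c) for c in group]) for level in group)
--     return moves
-- ===== SOURCE B (Python) =====
-- def _rle_pairs(s):
--     pairs = []
--     for c in s:
--         if pairs and pairs[-1][0] == c:
--             pairs[-1] = (c, pairs[-1][1] + 1)
--         else:
--             pairs.append((c, 1))
--     return pairs
--
--
-- def _group_cost(counts):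
--     gs = sorted(counts)
--     best = None
--     cnt_l = 0
--     sum_l = 0
--     cnt_r = len(gs)
--     sum_r = sum(gs)
--     for x in gs:
--         cand = cnt_l * x - sum_l + sum_r - cnt_r * x
--         if best is None or cand < best:
--             best = cand
--         cnt_l += 1
--         sum_l += x
--         cnt_r -= 1
--         sum_r -= x
--     return best
--
--
-- def solve(N, strings):
--     pls = [_rle_pairs(s) for s in strings]
--     key = [c for c, _ in pls[0]]
--     for p in pls[1:]:
--         if [c for c, _ in p] != key:
--             return -1
--     counts = [[k for _, k in p] for p in pls]
--     return sum(_group_cost(g) for g in zip(*counts))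
-- ===== Notes on version B (the rewrite author's own statement) =====
-- stated objective: faster
-- what changed: B fuses A's two separate state-machine passes (uniques, rle) into one run-length (char,count) pass per string, and replaces A's quadratic min-over-levels-of-sum-of-absolute-deviations scan per group by sorting the group once and taking a running minimum of the cost computed from prefix/suffix counts and sums in a single pass.
import Mathlib
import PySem

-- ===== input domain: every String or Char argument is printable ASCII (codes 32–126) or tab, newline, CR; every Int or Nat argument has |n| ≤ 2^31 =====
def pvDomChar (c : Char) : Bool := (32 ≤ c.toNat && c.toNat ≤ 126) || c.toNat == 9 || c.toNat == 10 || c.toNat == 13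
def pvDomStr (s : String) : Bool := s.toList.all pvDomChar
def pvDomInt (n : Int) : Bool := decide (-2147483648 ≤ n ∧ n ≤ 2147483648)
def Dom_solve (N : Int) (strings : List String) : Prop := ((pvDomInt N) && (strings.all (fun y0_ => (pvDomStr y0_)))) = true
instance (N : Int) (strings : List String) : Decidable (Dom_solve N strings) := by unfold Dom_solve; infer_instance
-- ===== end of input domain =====

-- B replaces A's quadratic min-over-levels scan per group by sort + one prefix-sum pass, and A's two
-- separate state-machine passes (uniques, rle) by one fused run-length-pair pass.

-- ===== PORT A =====

-- zip(*lists) for lists of Int lists (truncating transpose), shared by both ports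
def pyZipGo : List Int → List (List Int) → List (List Int)
  | [], _ => []
  | a :: t, rest =>
    if rest.all (fun l => !l.isEmpty) then
      (a :: rest.map (fun l => l.headD 0)) :: pyZipGo t (rest.map List.tail)
    else []

def pyZip (ls : List (List Int)) : List (List Int) :=
  match ls with
  | [] => []
  | l0 :: rest => pyZipGo l0 rest

-- loop body of A's `uniques`
def stepU (acc : Option Char × List (Option Char)) (c : Char) : Option Char × List (Option Char) :=
  match acc with
  | (none, groups) => (some c, groups)
  | (some d, groups) => if c ≠ d then (some c, groups ++ [some d]) else (some d, groups)

def uniquesA (s : String) : List (Option Char) :=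
  let st := s.toList.foldl stepU (none, [])
  st.2 ++ [st.1]

-- loop body of A's `rle`
def stepR (acc : Option Char × List Int × Int) (c : Char) : Option Char × List Int × Int :=
  match acc with
  | (none, groups, _) => (some c, groups, 1)
  | (some d, groups, k) => if c ≠ d then (some c, groups ++ [k], 1) else (some d, groups, k + 1)

def rleA (s : String) : List Int :=
  let st := s.toList.foldl stepR (none, [], 0)
  st.2.1 ++ [st.2.2]

def solve (N : Int) (strings : List String) : Int :=
  match strings with
  | [] => 0  -- Python raises IndexError on strings[0]; excluded by Pre_solve
  | s0 :: rest =>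
    let u0 := uniquesA s0
    if rest.any (fun s => decide (uniquesA s ≠ u0)) then -1
    else
      let rlest := pyZip ((s0 :: rest).map rleA)
      rlest.foldl (fun moves group =>
        moves + (PySem.List.min?
                  (group.map (fun level => (group.map (fun c => |level - c|)).sum))
                  (fun v => v)).getD 0) 0

-- ===== PORT B =====

-- loop body of B's `_rle_pairs` (one fused pass: run characters with their lengths)
def stepP (pairs : List (Char × Int)) (c : Char) : List (Char × Int) :=
  match pairs.getLast? with
  | some (d, k) => if d = c then pairs.dropLast ++ [(c, k + 1)] else pairs ++ [(c, 1)]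
  | none => pairs ++ [(c, 1)]

def rlePairsB (s : String) : List (Char × Int) := s.toList.foldl stepP []

-- loop body of B's `_group_cost`: running minimum of the prefix-sum cost formula
def stepC (st : Option Int × Int × Int × Int × Int) (x : Int) : Option Int × Int × Int × Int × Int :=
  match st with
  | (best, cntL, sumL, cntR, sumR) =>
    let cand := cntL * x - sumL + sumR - cntR * x
    let best' := match best with
      | none => some cand
      | some b => if cand < b then some cand else some b
    (best', cntL + 1, sumL + x, cntR - 1, sumR - x)

def groupCostB (g : List Int) : Int :=
  let gs := PySem.List.sorted g (fun v => v) false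
  let st := gs.foldl stepC (none, 0, 0, (gs.length : Int), gs.sum)
  st.1.getD 0  -- Python returns `best`; it is None only for an empty group, which solve never passes

def solve_alt (N : Int) (strings : List String) : Int :=
  match strings with
  | [] => 0  -- Python raises IndexError on pls[0]; excluded by Pre_solve
  | s0 :: rest =>
    let key := (rlePairsB s0).map Prod.fst
    if (rest.map rlePairsB).any (fun p => decide (p.map Prod.fst ≠ key)) then -1
    else
      let counts := ((s0 :: rest).map rlePairsB).map (fun p => p.map Prod.snd)
      ((pyZip counts).map groupCostB).sum

-- ===== PRECONDITION & SPEC =====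
-- Pre_ excludes only the empty string list, on which A raises IndexError at strings[0].
def Pre_solve (N : Int) (strings : List String) : Prop := strings ≠ []
instance (N : Int) (strings : List String) : Decidable (Pre_solve N strings) := by unfold Pre_solve; infer_instance

def pvWitness_solve : Int × List String := (2, ["aab", "ab"])

def Spec_solve (N : Int) (strings : List String) (out : Int) : Prop := out = solve_alt N strings
instance (N : Int) (strings : List String) (out : Int) : Decidable (Spec_solve N strings out) := by unfold Spec_solve; infer_instance

-- ===== CLAIM (what is proved, stated in full; the proofs are below) =====
def Claim_equal_solve : Prop := ∀ (N : Int) (strings : List String), Dom_solve N strings → Pre_solve N strings → Spec_solve N strings (solve N strings)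

-- ===== LEMMAS AND PROOFS =====

lemma pyZip_cons (l0 : List Int) (rest : List (List Int)) :
    pyZip (l0 :: rest) = pyZipGo l0 rest := rfl

lemma pyZipGo_nil (rest : List (List Int)) : pyZipGo [] rest = [] := rfl

lemma pyZipGo_cons (a : Int) (t : List Int) (rest : List (List Int)) :
    pyZipGo (a :: t) rest
      = if rest.all (fun l => !l.isEmpty) then
          (a :: rest.map (fun l => l.headD 0)) :: pyZipGo t (rest.map List.tail)
        else [] := rfl

-- A's uniques / rle states, read off from B's pair list
def reprU (ps : List (Char × Int)) : Option Char × List (Option Char) :=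
  match ps.getLast? with
  | none => (none, [])
  | some (d, _) => (some d, ps.dropLast.map (fun p => some p.1))

def reprR (ps : List (Char × Int)) : Option Char × List Int × Int :=
  match ps.getLast? with
  | none => (none, [], 0)
  | some (d, k) => (some d, ps.dropLast.map Prod.snd, k)

lemma stepU_repr (ps : List (Char × Int)) (c : Char) :
    stepU (reprU ps) c = reprU (stepP ps c) := by
  rcases List.eq_nil_or_concat ps with rfl | ⟨L, ⟨d, k⟩, rfl⟩
  · simp [reprU, stepP, stepU]
  · by_cases h : d = c
    · subst h
      simp [reprU, stepP, stepU, List.concat_eq_append]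
    · have h' : c ≠ d := Ne.symm h
      simp [reprU, stepP, stepU, List.concat_eq_append, h, h']

lemma stepR_repr (ps : List (Char × Int)) (c : Char) :
    stepR (reprR ps) c = reprR (stepP ps c) := by
  rcases List.eq_nil_or_concat ps with rfl | ⟨L, ⟨d, k⟩, rfl⟩
  · simp [reprR, stepP, stepR]
  · by_cases h : d = c
    · subst h
      simp [reprR, stepP, stepR, List.concat_eq_append]
    · have h' : c ≠ d := Ne.symm h
      simp [reprR, stepP, stepR, List.concat_eq_append, h, h']

lemma foldU_repr (l : List Char) : ∀ ps : List (Char × Int),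
    l.foldl stepU (reprU ps) = reprU (l.foldl stepP ps) := by
  induction l with
  | nil => intro ps; rfl
  | cons c l ih => intro ps; simp only [List.foldl_cons, stepU_repr]; exact ih _

lemma foldR_repr (l : List Char) : ∀ ps : List (Char × Int),
    l.foldl stepR (reprR ps) = reprR (l.foldl stepP ps) := by
  induction l with
  | nil => intro ps; rfl
  | cons c l ih => intro ps; simp only [List.foldl_cons, stepR_repr]; exact ih _

lemma uniquesA_repr (s : String) :
    uniquesA s = if rlePairsB s = [] then [none]
                 else (rlePairsB s).map (fun p => some p.1) := by
  have h : s.toList.foldl stepU (none, []) = reprU (rlePairsB s) := by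
    have := foldU_repr s.toList []
    simpa [reprU, rlePairsB] using this
  unfold uniquesA
  rw [h]
  rcases List.eq_nil_or_concat (rlePairsB s) with h0 | ⟨L, ⟨d, k⟩, h0⟩ <;> rw [h0]
  · simp [reprU]
  · simp [reprU]

lemma rleA_repr (s : String) :
    rleA s = if rlePairsB s = [] then [(0 : Int)]
             else (rlePairsB s).map Prod.snd := by
  have h : s.toList.foldl stepR (none, [], 0) = reprR (rlePairsB s) := by
    have := foldR_repr s.toList []
    simpa [reprR, rlePairsB] using this
  unfold rleA
  rw [h]
  rcases List.eq_nil_or_concat (rlePairsB s) with h0 | ⟨L, ⟨d, k⟩, h0⟩ <;> rw [h0]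
  · simp [reprR]
  · simp [reprR]

lemma uniques_eq_iff (s t : String) :
    uniquesA s = uniquesA t ↔ (rlePairsB s).map Prod.fst = (rlePairsB t).map Prod.fst := by
  rw [uniquesA_repr s, uniquesA_repr t]
  rcases hs : rlePairsB s with _ | ⟨p, ps⟩ <;> rcases ht : rlePairsB t with _ | ⟨q, qt⟩
  · simp
  · simp
  · simp
  · simp only [List.cons_ne_nil, List.map_cons, List.cons.injEq, Option.some.injEq, reduceIte]
    refine and_congr Iff.rfl ?_
    rw [show (List.map (fun p => some p.1) ps) = (ps.map Prod.fst).map some from by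
        rw [List.map_map]; rfl,
      show (List.map (fun p => some p.1) qt) = (qt.map Prod.fst).map some from by
        rw [List.map_map]; rfl]
    exact ⟨fun h => List.map_injective_iff.mpr (Option.some_injective _) h, fun h => by rw [h]⟩

-- B's per-group cost of a candidate level
def costf (x : Int) (g : List Int) : Int := (g.map (fun c => |x - c|)).sum

-- the running minimum exactly as B's loop folds it
def minStep (o : Option Int) (a : Int) : Option Int :=
  match o with
  | none => some a
  | some b => if a < b then some a else some b

def minO? (l : List Int) : Option Int := l.foldl minStep none

lemma minO?_eq_min? (l : List Int) : minO? l = l.min? := by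
  cases l with
  | nil => rfl
  | cons x t =>
    rw [List.min?_cons']
    show t.foldl minStep (some x) = some (t.foldl min x)
    induction t generalizing x with
    | nil => rfl
    | cons a t ih =>
      simp only [List.foldl_cons]
      have : minStep (some x) a = some (min x a) := by
        simp only [minStep]
        rcases lt_or_ge a x with h | h
        · rw [if_pos h, min_eq_right (le_of_lt h)]
        · rw [if_neg (not_lt.mpr h), min_eq_left h]
      rw [this, ih]

lemma sum_x_sub (x : Int) (l : List Int) :
    (l.map (fun c => x - c)).sum = (l.length : Int) * x - l.sum := by
  induction l with
  | nil => simp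
  | cons a l ih => simp [ih]; ring

lemma sum_sub_x (x : Int) (l : List Int) :
    (l.map (fun c => c - x)).sum = l.sum - (l.length : Int) * x := by
  induction l with
  | nil => simp
  | cons a l ih => simp [ih]; ring

lemma costFold (g : List Int) (hg : g.Pairwise (· ≤ ·)) :
    ∀ (r p : List Int), g = p ++ r →
      (r.foldl stepC (minO? (p.map (fun x => costf x g)), (p.length : Int), p.sum,
        (r.length : Int), r.sum)).1 = minO? (g.map (fun x => costf x g)) := by
  intro r
  induction r with
  | nil => intro p hp; simp [hp]
  | cons x r' ih =>
    intro p hp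
    have hsplit := List.pairwise_append.mp (hp ▸ hg)
    have hxr' : ∀ c ∈ x :: r', x ≤ c := by
      intro c hc
      rcases List.mem_cons.mp hc with rfl | hc'
      · exact le_refl c
      · exact (List.pairwise_cons.mp hsplit.2.1).1 c hc'
    have hpx : ∀ c ∈ p, c ≤ x := fun c hc => hsplit.2.2 c hc x (by simp)
    have hcand : (p.length : Int) * x - p.sum + (x :: r').sum - ((x :: r').length : Int) * x
        = costf x g := by
      have h1 : (p.map (fun c => |x - c|)) = p.map (fun c => x - c) :=
        List.map_congr_left (fun c hc => abs_of_nonneg (by have := hpx c hc; omega))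
      have h2 : ((x :: r').map (fun c => |x - c|)) = (x :: r').map (fun c => c - x) :=
        List.map_congr_left (fun c hc => by
          have := hxr' c hc
          rw [abs_of_nonpos (by omega)]; ring)
      rw [costf, hp, List.map_append, List.sum_append, h1, h2, sum_x_sub, sum_sub_x]
      ring
    have hmin : minO? ((p ++ [x]).map (fun y => costf y g))
        = minStep (minO? (p.map (fun y => costf y g))) (costf x g) := by
      rw [List.map_append]
      simp [minO?, List.foldl_append]
    have hstep : stepC (minO? (p.map (fun y => costf y g)), (p.length : Int), p.sum,
        ((x :: r').length : Int), (x :: r').sum) x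
        = (minO? ((p ++ [x]).map (fun y => costf y g)), ((p ++ [x]).length : Int), (p ++ [x]).sum,
           (r'.length : Int), r'.sum) := by
      rw [hmin]
      simp only [stepC]
      rw [hcand]
      refine Prod.ext rfl (Prod.ext ?_ (Prod.ext ?_ (Prod.ext ?_ ?_)))
      · simp [List.length_append]
      · simp [List.sum_append]
      · simp [List.length_cons]
      · simp [List.sum_cons]
    rw [List.foldl_cons, hstep]
    exact ih (p ++ [x]) (by rw [hp, List.append_assoc]; rfl)

lemma min?_perm {l1 l2 : List Int} (h : l1.Perm l2) : l1.min? = l2.min? := by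
  cases h1 : l1.min? with
  | none =>
    rw [List.min?_eq_none_iff] at h1
    subst h1
    rw [h.symm.eq_nil]
    rfl
  | some m =>
    obtain ⟨hm, hb⟩ := List.min?_eq_some_iff.mp h1
    cases h2 : l2.min? with
    | none =>
      rw [List.min?_eq_none_iff] at h2
      subst h2
      exact absurd (h.mem_iff.mp hm) (List.not_mem_nil)
    | some m' =>
      obtain ⟨hm', hb'⟩ := List.min?_eq_some_iff.mp h2
      have h3 : m ≤ m' := hb m' (h.mem_iff.mpr hm')
      have h4 : m' ≤ m := hb' m (h.mem_iff.mp hm)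
      rw [le_antisymm h3 h4]

lemma pymin_eq_min? (l : List Int) (hl : l ≠ []) :
    PySem.List.min? l (fun v => v) = l.min? := by
  obtain ⟨a, t, rfl⟩ := List.exists_cons_of_ne_nil hl
  rw [PySem.List.min?_id_cons, List.min?_cons']

lemma group_eq (grp : List Int) (h : grp ≠ []) :
    (PySem.List.min? (grp.map (fun level => (grp.map (fun c => |level - c|)).sum))
      (fun v => v)).getD 0 = groupCostB grp := by
  have hne : grp.map (fun level => (grp.map (fun c => |level - c|)).sum) ≠ [] := by
    simpa using h
  have hperm : (PySem.List.sorted grp (fun v => v) false).Perm grp :=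
    PySem.List.sorted_perm grp (fun v => v) false
  have hpw : (PySem.List.sorted grp (fun v => v) false).Pairwise (· ≤ ·) := by
    have := PySem.List.sorted_pairwise grp (fun v => v)
    simpa using this
  have hfold := costFold (PySem.List.sorted grp (fun v => v) false) hpw
    (PySem.List.sorted grp (fun v => v) false) [] rfl
  simp only [List.map_nil, List.length_nil, List.sum_nil, Nat.cast_zero] at hfold
  rw [show minO? ([] : List Int) = none from rfl] at hfold
  simp only [groupCostB]
  rw [hfold]
  have hcost : (PySem.List.sorted grp (fun v => v) false).map
      (fun x => costf x (PySem.List.sorted grp (fun v => v) false))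
      = (PySem.List.sorted grp (fun v => v) false).map (fun x => costf x grp) := by
    refine List.map_congr_left (fun x _ => ?_)
    unfold costf
    exact (hperm.map (fun c => |x - c|)).sum_eq
  rw [hcost, minO?_eq_min?, min?_perm (hperm.map (fun x => costf x grp)),
    pymin_eq_min? _ hne]
  rfl

lemma pyZipGo_mem_ne_nil {l0 : List Int} {rest : List (List Int)} {grp : List Int}
    (h : grp ∈ pyZipGo l0 rest) : grp ≠ [] := by
  induction l0 generalizing rest with
  | nil => simp [pyZipGo_nil] at h
  | cons a t ih =>
    rw [pyZipGo_cons] at h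
    split at h
    · rcases List.mem_cons.mp h with rfl | h'
      · simp
      · exact ih h'
    · simp at h

lemma foldl_min_all_zero (l : List Int) (hl : ∀ y ∈ l, y = 0) : l.foldl min 0 = 0 := by
  induction l with
  | nil => rfl
  | cons a t ih =>
    have ha : a = 0 := hl a (by simp)
    subst ha
    simp only [List.foldl_cons, min_self]
    exact ih fun y hy => hl y (by simp [hy])

theorem solve_eq (N : Int) (strings : List String) (hpre : strings ≠ []) :
    solve N strings = solve_alt N strings := by
  cases strings with
  | nil => exact absurd rfl hpre
  | cons s0 rest =>
    simp only [solve, solve_alt]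
    have hcond : (rest.map rlePairsB).any
          (fun p => decide (p.map Prod.fst ≠ (rlePairsB s0).map Prod.fst))
        = rest.any (fun s => decide (uniquesA s ≠ uniquesA s0)) := by
      rw [List.any_map]
      refine List.any_congr rfl (fun s => ?_)
      simp only [Function.comp]
      exact decide_eq_decide.mpr (not_congr (uniques_eq_iff s s0).symm)
    rw [hcond]
    cases hc : rest.any (fun s => decide (uniquesA s ≠ uniquesA s0)) with
    | true => simp
    | false =>
      simp only [Bool.false_eq_true, if_false]
      have hall : ∀ s ∈ rest, (rlePairsB s).map Prod.fst = (rlePairsB s0).map Prod.fst := by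
        intro s hs
        by_contra hne
        have : rest.any (fun s => decide (uniquesA s ≠ uniquesA s0)) = true := by
          rw [List.any_eq_true]
          exact ⟨s, hs, by
            simp only [decide_eq_true_eq]
            exact fun h => hne ((uniques_eq_iff s s0).mp h)⟩
        rw [this] at hc
        exact absurd hc (by simp)
      by_cases hs0 : rlePairsB s0 = []
      · -- every string is empty: A sums the cost of one all-zero group, B sums nothing
        have hallnil : ∀ s ∈ rest, rlePairsB s = [] := by
          intro s hs
          have := hall s hs
          rw [hs0] at this
          simpa using this
        have hA : (s0 :: rest).map rleA = [(0 : Int)] :: rest.map (fun _ => [(0 : Int)]) := by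
          simp only [List.map_cons]
          refine congrArg₂ _ ?_ ?_
          · rw [rleA_repr, if_pos hs0]
          · exact List.map_congr_left fun s hs => by rw [rleA_repr, if_pos (hallnil s hs)]
        have hB : ((s0 :: rest).map rlePairsB).map (fun p => p.map Prod.snd)
            = [] :: (rest.map rlePairsB).map (fun p => p.map Prod.snd) := by
          simp [hs0]
        rw [hA, hB]
        have hzip : pyZip ([(0 : Int)] :: rest.map (fun _ => [(0 : Int)]))
            = [(0 : Int) :: rest.map (fun _ => (0 : Int))] := by
          rw [pyZip_cons, pyZipGo_cons, if_pos (by simp), pyZipGo_nil]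
          simp
        rw [hzip, pyZip_cons, pyZipGo_nil]
        simp only [List.foldl_cons, List.foldl_nil, List.map_nil, List.sum_nil]
        have hz : ∀ y ∈ (0 : Int) :: rest.map (fun _ => (0 : Int)), y = 0 := by
          intro y hy
          rcases List.mem_cons.mp hy with rfl | hy'
          · rfl
          · obtain ⟨_, _, rfl⟩ := List.mem_map.mp hy'
            rfl
        have hvals : (((0 : Int) :: rest.map (fun _ => (0 : Int))).map
            (fun level => ((((0 : Int) :: rest.map (fun _ => (0 : Int))).map
              (fun c => |level - c|)).sum)))
            = ((0 : Int) :: rest.map (fun _ => (0 : Int))).map (fun _ => (0 : Int)) := by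
          refine List.map_congr_left ?_
          intro level hlevel
          refine List.sum_eq_zero ?_
          intro y hy
          obtain ⟨c, hc, rfl⟩ := List.mem_map.mp hy
          rw [hz c hc, hz level hlevel]
          simp
        rw [hvals, List.map_cons, PySem.List.min?_id_cons]
        rw [foldl_min_all_zero _ (fun y hy => by
          obtain ⟨_, _, rfl⟩ := List.mem_map.mp hy; rfl)]
        rfl
      · -- no string is empty: identical groups, equal per-group costs
        have hne : ∀ s ∈ s0 :: rest, rlePairsB s ≠ [] := by
          intro s hs
          rcases List.mem_cons.mp hs with rfl | hs'
          · exact hs0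
          · intro h0
            have := hall s hs'
            rw [h0] at this
            exact hs0 (by simpa using (List.map_eq_nil_iff.mp this.symm))
        have hmap : (s0 :: rest).map rleA
            = ((s0 :: rest).map rlePairsB).map (fun p => p.map Prod.snd) := by
          rw [List.map_map]
          exact List.map_congr_left fun s hs => by
            rw [rleA_repr, if_neg (hne s hs)]; rfl
        rw [hmap]
        cases hcounts : ((s0 :: rest).map rlePairsB).map (fun p => p.map Prod.snd) with
        | nil => simp at hcounts
        | cons c0 crest =>
          rw [pyZip_cons, PySem.List.foldl_add]
          rw [show (0 : Int) + ((pyZipGo c0 crest).map (fun group =>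
              (PySem.List.min? (group.map (fun level =>
                (group.map (fun c => |level - c|)).sum)) (fun v => v)).getD 0)).sum
            = ((pyZipGo c0 crest).map (fun group =>
              (PySem.List.min? (group.map (fun level =>
                (group.map (fun c => |level - c|)).sum)) (fun v => v)).getD 0)).sum from by ring]
          refine congrArg _ (List.map_congr_left fun grp hgrp => ?_)
          exact group_eq grp (pyZipGo_mem_ne_nil hgrp)

-- ===== VERDICT (by name: the statement is the Claim_ definition above) =====
theorem solve_spec : Claim_equal_solve := by
  intro N strings _ hpre
  unfold Spec_solve
  exact solve_eq N strings hpre
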